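-- pv_equiv track=rewrite | github.com/iRashedK/HR | app/openrouter.py | merge_json_results
-- ===== SOURCE A (Python) =====
-- def merge_json_results(objs: list) -> dict:
--     """Merge multiple recommendation JSON objects, avoiding duplicates."""
--     merged = {"certifications": [], "courses": [], "roadmap": []}
--     for obj in objs:
--         for key in ("certifications", "courses"):
--             for item in obj.get(key, []):
--                 if item and item not in merged[key]:
--                     merged[key].append(item)
--         for step in obj.get("roadmap", []):
--             if step and step not in merged["roadmap"]:
--                 merged["roadmap"].append(step)
--     return merged
-- ===== SOURCE B (Python) =====
-- def merge_json_results(objs: list) -> dict: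
--     """Merge multiple recommendation JSON objects, avoiding duplicates."""
--     all_certs, all_courses, all_roadmap = [], [], []
--     for obj in objs:
--         all_certs += obj.get("certifications", [])
--         all_courses += obj.get("courses", [])
--         all_roadmap += obj.get("roadmap", [])
--
--     def dedup(items):
--         out = []
--         for x in items:
--             if x and x not in out:
--                 out.append(x)
--         return out
--
--     return {
--         "certifications": dedup(all_certs),
--         "courses": dedup(all_courses),
--         "roadmap": dedup(all_roadmap),
--     }
-- ===== Notes on version B (the rewrite author's own statement) =====
-- stated objective: simpler
-- what changed: Replaces A's single interleaved pass (per-object nested key/item loops updating the shared merged dict with dedup-on-append) by a two-phase build-then-reduce structure: one collection pass concatenates all items per key into three flat lists, then an independent dedup pass filters each list once.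
import Mathlib
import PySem

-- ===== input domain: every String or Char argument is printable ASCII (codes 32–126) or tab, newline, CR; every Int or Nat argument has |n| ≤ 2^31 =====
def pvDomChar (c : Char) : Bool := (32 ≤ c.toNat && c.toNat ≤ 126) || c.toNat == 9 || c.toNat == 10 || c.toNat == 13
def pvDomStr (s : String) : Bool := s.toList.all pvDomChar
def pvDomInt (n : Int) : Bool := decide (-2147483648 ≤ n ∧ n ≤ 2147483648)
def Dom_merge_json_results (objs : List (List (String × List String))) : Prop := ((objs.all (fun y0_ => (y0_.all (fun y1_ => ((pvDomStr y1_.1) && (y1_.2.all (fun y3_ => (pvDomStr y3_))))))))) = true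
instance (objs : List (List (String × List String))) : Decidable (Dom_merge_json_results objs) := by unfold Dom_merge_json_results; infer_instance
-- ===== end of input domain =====

-- B replaces A's single interleaved dedup-on-append pass over the shared merged dict by a
-- two-phase structure: collect all items per key into three flat lists, then dedup each once (objective: simpler).

-- ===== PORT A =====
-- obj.get(key, []) on the association-list dict (first match)
def pvObjGet (obj : List (String × List String)) (key : String) : List String :=
  (PySem.Dict.mk obj).getD key []

-- 'if item and item not in merged[key]: merged[key].append(item)'
def pvMergeItemA (key : String) (m : PySem.Dict String (List String)) (item : String) :
    PySem.Dict String (List String) :=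
  if item ≠ "" ∧ item ∉ m.getD key [] then m.insert key (m.getD key [] ++ [item]) else m

def pvMergeObjA (m : PySem.Dict String (List String)) (obj : List (String × List String)) :
    PySem.Dict String (List String) :=
  let m := ["certifications", "courses"].foldl
    (fun m key => (pvObjGet obj key).foldl (pvMergeItemA key) m) m
  (pvObjGet obj "roadmap").foldl (pvMergeItemA "roadmap") m

def merge_json_results (objs : List (List (String × List String))) : List (String × List String) :=
  (objs.foldl pvMergeObjA
    (PySem.Dict.mk [("certifications", []), ("courses", []), ("roadmap", [])])).items

-- ===== PORT B =====
-- dedup(items): keep each truthy item on its first occurrence (list membership, order-preserving)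
def pvDedup (items : List String) : List String :=
  items.foldl (fun out x => if x ≠ "" ∧ x ∉ out then out ++ [x] else out) []

def merge_json_results_alt (objs : List (List (String × List String))) : List (String × List String) :=
  let allCerts := objs.foldl (fun acc obj => acc ++ pvObjGet obj "certifications") []
  let allCourses := objs.foldl (fun acc obj => acc ++ pvObjGet obj "courses") []
  let allRoadmap := objs.foldl (fun acc obj => acc ++ pvObjGet obj "roadmap") []
  [("certifications", pvDedup allCerts), ("courses", pvDedup allCourses),
   ("roadmap", pvDedup allRoadmap)]

-- ===== PRECONDITION & SPEC =====
def Spec_merge_json_results (objs : List (List (String × List String))) (out : List (String × List String)) : Prop := out = merge_json_results_alt objs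
instance (objs : List (List (String × List String))) (out : List (String × List String)) : Decidable (Spec_merge_json_results objs out) := by unfold Spec_merge_json_results; infer_instance

-- ===== CLAIM (what is proved, stated in full; the proofs are below) =====
def Claim_equal_merge_json_results : Prop := ∀ (objs : List (List (String × List String))), Dom_merge_json_results objs → Spec_merge_json_results objs (merge_json_results objs)

-- ===== LEMMAS AND PROOFS =====

-- one dedup step, as used by both ports
def pvStep (out : List String) (x : String) : List String :=
  if x ≠ "" ∧ x ∉ out then out ++ [x] else out

-- the literal three-key dict A's loop maintains
def pvD3 (c co r : List String) : PySem.Dict String (List String) :=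
  PySem.Dict.mk [("certifications", c), ("courses", co), ("roadmap", r)]

lemma itemsFold_cert (items : List String) (c co r : List String) :
    items.foldl (pvMergeItemA "certifications") (pvD3 c co r) =
      pvD3 (items.foldl pvStep c) co r := by
  induction items generalizing c with
  | nil => rfl
  | cons x t ih =>
    simp only [List.foldl_cons]
    have hstep : pvMergeItemA "certifications" (pvD3 c co r) x = pvD3 (pvStep c x) co r := by
      simp [pvMergeItemA, pvStep, pvD3, PySem.Dict.getD, PySem.Dict.get?, PySem.Dict.insert,
        PySem.Dict.contains]
      split_ifs <;> rfl
    rw [hstep, ih]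

lemma itemsFold_course (items : List String) (c co r : List String) :
    items.foldl (pvMergeItemA "courses") (pvD3 c co r) =
      pvD3 c (items.foldl pvStep co) r := by
  induction items generalizing co with
  | nil => rfl
  | cons x t ih =>
    simp only [List.foldl_cons]
    have hstep : pvMergeItemA "courses" (pvD3 c co r) x = pvD3 c (pvStep co x) r := by
      simp [pvMergeItemA, pvStep, pvD3, PySem.Dict.getD, PySem.Dict.get?, PySem.Dict.insert,
        PySem.Dict.contains]
      split_ifs <;> rfl
    rw [hstep, ih]

lemma itemsFold_road (items : List String) (c co r : List String) :
    items.foldl (pvMergeItemA "roadmap") (pvD3 c co r) =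
      pvD3 c co (items.foldl pvStep r) := by
  induction items generalizing r with
  | nil => rfl
  | cons x t ih =>
    simp only [List.foldl_cons]
    have hstep : pvMergeItemA "roadmap" (pvD3 c co r) x = pvD3 c co (pvStep r x) := by
      simp [pvMergeItemA, pvStep, pvD3, PySem.Dict.getD, PySem.Dict.get?, PySem.Dict.insert,
        PySem.Dict.contains]
      split_ifs <;> rfl
    rw [hstep, ih]

lemma mergeObjA_d3 (obj : List (String × List String)) (c co r : List String) :
    pvMergeObjA (pvD3 c co r) obj =
      pvD3 ((pvObjGet obj "certifications").foldl pvStep c)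
           ((pvObjGet obj "courses").foldl pvStep co)
           ((pvObjGet obj "roadmap").foldl pvStep r) := by
  simp only [pvMergeObjA, List.foldl_cons, List.foldl_nil]
  rw [itemsFold_cert, itemsFold_course, itemsFold_road]

lemma mainFold (objs : List (List (String × List String))) (c co r : List String) :
    objs.foldl pvMergeObjA (pvD3 c co r) =
      pvD3 ((objs.flatMap (pvObjGet · "certifications")).foldl pvStep c)
           ((objs.flatMap (pvObjGet · "courses")).foldl pvStep co)
           ((objs.flatMap (pvObjGet · "roadmap")).foldl pvStep r) := by
  induction objs generalizing c co r with
  | nil => simp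
  | cons o t ih =>
    simp only [List.foldl_cons, List.flatMap_cons, List.foldl_append]
    rw [mergeObjA_d3, ih]

-- ===== VERDICT (by name: the statement is the Claim_ definition above) =====
theorem merge_json_results_spec : Claim_equal_merge_json_results := by
  intro objs _
  show merge_json_results objs = merge_json_results_alt objs
  have hB : ∀ k : String, objs.foldl (fun acc obj => acc ++ pvObjGet obj k) [] =
      objs.flatMap (pvObjGet · k) := by
    intro k
    rw [PySem.List.foldl_append_eq_flatMap]
    simp
  unfold merge_json_results merge_json_results_alt
  rw [hB, hB, hB]
  have : (PySem.Dict.mk [("certifications", ([] : List String)), ("courses", []), ("roadmap", [])])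
      = pvD3 [] [] [] := rfl
  rw [this, mainFold]
  simp only [pvD3, pvDedup]
  exact rfl
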